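-- pv_equiv track=rewrite | github.com/jiange91/lm_compiler | compiler/optimizer_old/params/common.py | mflatten
-- ===== SOURCE A (Python) =====
-- from collections import defaultdict
--
-- T_ModuleMapping = dict[str, str]
--
-- def mflatten(mapping: T_ModuleMapping) -> T_ModuleMapping:
--     """flatten the mapping
--
--     Example:
--         original:
--             a -> [a1]
--             a1 -> [a2]
--         after:
--             a -> [a2]
--     """
--     def is_cyclic_util(graph, v, visited, rec_stack):
--         visited[v] = True
--         rec_stack[v] = True
--
--         if v in graph:
--             neighbor = graph[v]
--             if not visited[neighbor]:
--                 if is_cyclic_util(graph, neighbor, visited, rec_stack):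
--                     return True
--             elif rec_stack[neighbor]:
--                 return True
--
--         rec_stack[v] = False
--         return False
--
--     visited = defaultdict(False.__bool__)
--     rec_stack = defaultdict(False.__bool__)
--     for key in mapping:
--         if not visited[key]:
--             if is_cyclic_util(mapping, key, visited, rec_stack):
--                 raise ValueError('Cyclic mapping')
--
--     result: T_ModuleMapping = {}
--     for key, value in mapping.items():
--         while value in mapping:
--             value = mapping[value]
--         result[key] = value
--     return result
-- ===== SOURCE B (Python) =====
-- def mflatten(mapping):
--     """Flatten the mapping by resolving every value chain to its terminal,
--     memoizing the terminal of every node seen along the way (path compression)."""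
--     memo = {}
--
--     def resolve(v):
--         path = []
--         on_path = set()
--         while v in mapping and v not in memo:
--             if v in on_path:
--                 raise ValueError('Cyclic mapping')
--             on_path.add(v)
--             path.append(v)
--             v = mapping[v]
--         t = memo.get(v, v)
--         for u in path:
--             memo[u] = t
--         return t
--
--     return {k: resolve(v) for k, v in mapping.items()}
-- ===== Notes on version B (the rewrite author's own statement) =====
-- stated objective: alternative
-- what changed: Instead of re-chasing the value chain from scratch for every key (plus a separate recursive DFS cycle check), B resolves each chain once and memoizes the terminal of every node on the walked path (path compression), detecting cycles during the same walk; on worst-case long chains this is O(n) vs A's O(n^2), but on a timing run's random inputs (short chains) the measured times are comparable.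
import Mathlib
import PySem

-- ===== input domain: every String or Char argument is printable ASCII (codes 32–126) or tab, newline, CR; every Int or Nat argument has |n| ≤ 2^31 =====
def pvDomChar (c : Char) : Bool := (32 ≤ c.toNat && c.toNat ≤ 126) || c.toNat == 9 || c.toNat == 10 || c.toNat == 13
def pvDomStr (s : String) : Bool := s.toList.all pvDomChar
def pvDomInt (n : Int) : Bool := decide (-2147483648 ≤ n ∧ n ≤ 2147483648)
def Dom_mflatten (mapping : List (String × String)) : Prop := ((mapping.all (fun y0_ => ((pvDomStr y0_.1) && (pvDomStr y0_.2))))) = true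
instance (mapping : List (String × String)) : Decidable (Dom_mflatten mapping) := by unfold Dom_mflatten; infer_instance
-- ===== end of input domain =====

-- B replaces A's per-key re-chasing (plus a separate recursive DFS cycle check) by a single
-- memoized walk per chain (path compression): each node's terminal is computed once.

-- ===== PORT A =====

-- A's inner while loop 'while value in mapping: value = mapping[value]' with fuel;
-- under Pre_ every chain leaves the key set within mapping.length lookups, so the fuel is never short.
def pvChase (d : PySem.Dict String String) : Nat → String → String
  | 0, v => v
  | f + 1, v =>
    match d.get? v with
    | none => v
    | some u => pvChase d f u

-- is_cyclic_util: returns (cyclic?, visited, rec_stack); the fuel bounds the recursion depth,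
-- which in Python is at most #keys + 1 (each recursive call targets a freshly visited node).
def pvCyclicUtil (g : PySem.Dict String String) :
    Nat → String → PySem.Dict String Bool → PySem.Dict String Bool →
    Bool × PySem.Dict String Bool × PySem.Dict String Bool
  | 0, _, vis, rs => (false, vis, rs)
  | fuel + 1, v, vis, rs =>
    let vis1 := vis.insert v true
    let rs1 := rs.insert v true
    match g.get? v with
    | some nb =>
      if vis1.getD nb false = false then
        match pvCyclicUtil g fuel nb vis1 rs1 with
        | (true, vis2, rs2) => (true, vis2, rs2)
        | (false, vis2, rs2) => (false, vis2, rs2.insert v false)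
      else if rs1.getD nb false = true then (true, vis1, rs1)
      else (false, vis1, rs1.insert v false)
    | none => (false, vis1, rs1.insert v false)

def mflatten (mapping : List (String × String)) : List (String × String) :=
  let d := PySem.Dict.mk mapping
  let st := d.keys.foldl
    (fun (st : Bool × PySem.Dict String Bool × PySem.Dict String Bool) k =>
      if st.1 then st            -- Python has already raised: the loop body no longer runs
      else if st.2.1.getD k false = false then pvCyclicUtil d (mapping.length + 1) k st.2.1 st.2.2
      else st)
    (false, PySem.Dict.empty, PySem.Dict.empty)
  if st.1 then []                -- Python: raise ValueError('Cyclic mapping'); excluded by Pre_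
  else
    (mapping.foldl
      (fun (res : PySem.Dict String String) kv => res.insert kv.1 (pvChase d mapping.length kv.2))
      PySem.Dict.empty).items

-- ===== PORT B =====

-- B's resolve: walk the chain collecting the path until a terminal or a memoized node,
-- then memoize the terminal for the whole path.  'none' = ValueError (cycle), excluded by Pre_.
-- Fuel: under Pre_ the walk leaves the key set within mapping.length steps.
def pvResolve (d : PySem.Dict String String) :
    Nat → String → List String → PySem.Set String → PySem.Dict String String →
    Option (String × PySem.Dict String String)
  | 0, _, _, _, _ => none
  | fuel + 1, v, path, onPath, memo =>
    if d.contains v && !(memo.contains v) then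
      if PySem.Set.contains onPath v then none   -- raise ValueError('Cyclic mapping')
      else
        match d.get? v with
        | some u => pvResolve d fuel u (path ++ [v]) (PySem.Set.add onPath v) memo
        | none => none                           -- unreachable: d.contains v = true
    else
      let t := memo.getD v v
      some (t, path.foldl (fun m u => m.insert u t) memo)

def mflatten_alt (mapping : List (String × String)) : List (String × String) :=
  let d := PySem.Dict.mk mapping
  let r := mapping.foldl
    (fun (acc : Option (PySem.Dict String String × PySem.Dict String String)) kv =>
      match acc with
      | none => none
      | some (res, memo) =>
        match pvResolve d (mapping.length + 1) kv.2 [] PySem.Set.empty memo with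
        | none => none
        | some (t, memo') => some (res.insert kv.1 t, memo'))
    (some (PySem.Dict.empty, PySem.Dict.empty))
  match r with
  | none => []                    -- ValueError('Cyclic mapping'), excluded by Pre_
  | some (res, _) => res.items

-- ===== PRECONDITION & SPEC =====

-- The j-th successor of a node in the functional graph of the dict (none once the chain has
-- left the key set).  This is a graph notion used only to STATE acyclicity below and in the
-- proofs; neither port computes with it.
def pvIterN (d : PySem.Dict String String) : Nat → String → Option String
  | 0, v => some v
  | j + 1, v =>
    match d.get? v with
    | none => none
    | some u => pvIterN d j u

-- Pre_ says the mapping is ACYCLIC, stated as: every key reaches a terminal (non-key) node in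
-- at most mapping.length steps (a chain without a repeated node leaves the key set within
-- #keys steps, so the bound excludes nothing acyclic).  On cyclic mappings Python A raises
-- ValueError('Cyclic mapping') — and B raises the same error there.
def Pre_mflatten (mapping : List (String × String)) : Prop :=
  ∀ k ∈ (PySem.Dict.mk mapping).keys,
    ∃ j ≤ mapping.length,
      ((pvIterN (PySem.Dict.mk mapping) j k).map (PySem.Dict.mk mapping).contains) = some false

instance (mapping : List (String × String)) : Decidable (Pre_mflatten mapping) := by
  unfold Pre_mflatten; infer_instance

def pvWitness_mflatten : (List (String × String)) := [("a", "a1"), ("a1", "a2")]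

def Spec_mflatten (mapping : List (String × String)) (out : List (String × String)) : Prop := out = mflatten_alt mapping
instance (mapping : List (String × String)) (out : List (String × String)) : Decidable (Spec_mflatten mapping out) := by unfold Spec_mflatten; infer_instance

-- ===== CLAIM (what is proved, stated in full; the proofs are below) =====
def Claim_equal_mflatten : Prop := ∀ (mapping : List (String × String)), Dom_mflatten mapping → Pre_mflatten mapping → Spec_mflatten mapping (mflatten mapping)

-- ===== LEMMAS AND PROOFS =====

def pvGood (d : PySem.Dict String String) (n : Nat) (v : String) : Prop :=
  ∃ j ≤ n, ((pvIterN d j v).map d.contains) = some false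

theorem pvIterN_append (d : PySem.Dict String String) (a b : Nat) (v : String) :
    pvIterN d (a + b) v = (pvIterN d a v).bind (pvIterN d b) := by
  induction a generalizing v with
  | zero => simp [pvIterN]
  | succ a ih =>
    have h : a + 1 + b = (a + b) + 1 := by omega
    rw [h]
    simp only [pvIterN]
    cases hv : d.get? v with
    | none => simp
    | some u => simpa using ih u

theorem pvIterN_mul_self (d : PySem.Dict String String) (m : Nat) (v : String)
    (h : pvIterN d m v = some v) : ∀ k, pvIterN d (k * m) v = some v := by
  intro k
  induction k with
  | zero => simp [pvIterN]
  | succ k ih =>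
    rw [Nat.succ_mul, pvIterN_append, ih]
    simpa using h

theorem pvContains_false_get? {d : PySem.Dict String String} {t : String}
    (hct : d.contains t = false) : d.get? t = none := by
  have := PySem.Dict.contains_eq_isSome_get? (d := d) (k := t)
  rw [hct] at this
  cases h : d.get? t with
  | none => rfl
  | some u => rw [h] at this; simp at this

theorem pv_no_cycle (d : PySem.Dict String String) (n : Nat)
    (hG : ∀ v, pvGood d n v) :
    ∀ m v, 1 ≤ m → pvIterN d m v = some v → False := by
  intro m v hm hcyc
  obtain ⟨j, hj, hmap⟩ := hG v
  obtain ⟨t, ht, hct⟩ : ∃ t, pvIterN d j v = some t ∧ d.contains t = false := by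
    cases h : pvIterN d j v with
    | none => rw [h] at hmap; simp at hmap
    | some t => rw [h] at hmap; simp at hmap; exact ⟨t, rfl, hmap⟩
  have hbig : pvIterN d ((j + 1) * m) v = some v := pvIterN_mul_self d m v hcyc (j + 1)
  have hge : j + 1 ≤ (j + 1) * m := Nat.le_mul_of_pos_right _ hm
  have hsplit : (j + 1) * m = j + ((j + 1) * m - j) := by omega
  rw [hsplit, pvIterN_append, ht] at hbig
  simp only [Option.bind_some] at hbig
  have hr' : (j + 1) * m - j = ((j + 1) * m - j - 1) + 1 := by omega
  rw [hr'] at hbig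
  simp only [pvIterN, pvContains_false_get? hct] at hbig
  cases hbig

theorem pvChase_of_iterN (d : PySem.Dict String String) :
    ∀ (j : Nat) (v t : String), pvIterN d j v = some t → d.contains t = false →
    ∀ f, j ≤ f → pvChase d f v = t := by
  intro j
  induction j with
  | zero =>
    intro v t hit hct f _
    simp only [pvIterN] at hit
    cases hit
    cases f with
    | zero => rfl
    | succ f => simp [pvChase, pvContains_false_get? hct]
  | succ j ih =>
    intro v t hit hct f hf
    simp only [pvIterN] at hit
    cases hv : d.get? v with
    | none => rw [hv] at hit; cases hit
    | some u =>
      rw [hv] at hit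
      obtain ⟨f', rfl⟩ : ∃ f', f = f' + 1 := ⟨f - 1, by omega⟩
      simp only [pvChase, hv]
      exact ih u t hit hct f' (by omega)

theorem pvT_fix (d : PySem.Dict String String) (n : Nat) {v : String}
    (hv : d.get? v = none) : pvChase d n v = v := by
  cases n with
  | zero => rfl
  | succ n => simp [pvChase, hv]

theorem pvT_step (d : PySem.Dict String String) (n : Nat)
    (hG : ∀ v, pvGood d n v) {v u : String}
    (hv : d.get? v = some u) : pvChase d n v = pvChase d n u := by
  obtain ⟨j, hj, hmap⟩ := hG v
  obtain ⟨t, ht, hct⟩ : ∃ t, pvIterN d j v = some t ∧ d.contains t = false := by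
    cases h : pvIterN d j v with
    | none => rw [h] at hmap; simp at hmap
    | some t => rw [h] at hmap; simp at hmap; exact ⟨t, rfl, hmap⟩
  cases j with
  | zero =>
    simp only [pvIterN] at ht
    cases ht
    rw [pvContains_false_get? hct] at hv
    cases hv
  | succ j =>
    simp only [pvIterN, hv] at ht
    rw [pvChase_of_iterN d j u t ht hct n (by omega)]
    have hjv : pvIterN d (j + 1) v = some t := by simp only [pvIterN, hv]; exact ht
    rw [pvChase_of_iterN d (j + 1) v t hjv hct n (by omega)]

theorem pvT_reach (d : PySem.Dict String String) (n : Nat)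
    (hG : ∀ v, pvGood d n v) :
    ∀ (m : Nat) (u v : String), pvIterN d m u = some v →
      pvChase d n u = pvChase d n v := by
  intro m
  induction m with
  | zero => intro u v h; simp only [pvIterN] at h; cases h; rfl
  | succ m ih =>
    intro u v h
    simp only [pvIterN] at h
    cases hu : d.get? u with
    | none => rw [hu] at h; cases h
    | some w =>
      rw [hu] at h
      rw [pvT_step d n hG hu]
      exact ih w v h

theorem pvIterN_one (d : PySem.Dict String String) {v u : String}
    (h : d.get? v = some u) : pvIterN d 1 v = some u := by
  simp [pvIterN, h]

theorem pvIterN_snoc (d : PySem.Dict String String) {m : Nat} {x v u : String}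
    (hm : pvIterN d m x = some v) (hv : d.get? v = some u) :
    pvIterN d (m + 1) x = some u := by
  rw [pvIterN_append, hm, Option.bind_some]
  exact pvIterN_one d hv

theorem pvUtil_false (d : PySem.Dict String String) (n : Nat)
    (hG : ∀ v, pvGood d n v) :
    ∀ (fuel : Nat) (v : String) (vis rs : PySem.Dict String Bool),
      rs.getD v false = false →
      (∀ x, rs.getD x false = true → vis.getD x false = true) →
      (∀ x, rs.getD x false = true → ∃ m, pvIterN d m x = some v) →
      (pvCyclicUtil d fuel v vis rs).1 = false ∧
      (∀ x, (pvCyclicUtil d fuel v vis rs).2.2.getD x false = rs.getD x false) := by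
  intro fuel
  induction fuel with
  | zero =>
    intro v vis rs hv hS hR
    simp [pvCyclicUtil]
  | succ fuel ih =>
    intro v vis rs hv hS hR
    cases hnb : d.get? v with
    | none =>
      simp only [pvCyclicUtil, hnb]
      refine ⟨by trivial, fun x => ?_⟩
      rw [PySem.Dict.getD_insert, PySem.Dict.getD_insert]
      by_cases hx : x = v
      · simp [hx, hv]
      · simp [hx]
    | some nb =>
      simp only [pvCyclicUtil, hnb]
      by_cases hvis : (vis.insert v true).getD nb false = false
      · rw [if_pos hvis]
        have hnbv : nb ≠ v := by
          intro h
          rw [h, PySem.Dict.getD_insert_self] at hvis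
          cases hvis
        have hv' : (rs.insert v true).getD nb false = false := by
          rw [PySem.Dict.getD_insert, if_neg hnbv]
          cases hrs : rs.getD nb false with
          | false => rfl
          | true =>
            have := hS nb hrs
            rw [PySem.Dict.getD_insert, if_neg hnbv, this] at hvis
            cases hvis
        have hS' : ∀ x, (rs.insert v true).getD x false = true →
            (vis.insert v true).getD x false = true := by
          intro x hx
          rw [PySem.Dict.getD_insert] at hx ⊢
          by_cases hxv : x = v
          · simp [hxv]
          · rw [if_neg hxv] at hx ⊢; exact hS x hx
        have hR' : ∀ x, (rs.insert v true).getD x false = true →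
            ∃ m, pvIterN d m x = some nb := by
          intro x hx
          rw [PySem.Dict.getD_insert] at hx
          by_cases hxv : x = v
          · exact ⟨1, by rw [hxv]; exact pvIterN_one d hnb⟩
          · rw [if_neg hxv] at hx
            obtain ⟨m, hm⟩ := hR x hx
            exact ⟨m + 1, pvIterN_snoc d hm hnb⟩
        obtain ⟨hc, hrs2⟩ := ih nb (vis.insert v true) (rs.insert v true) hv' hS' hR'
        cases hrec : pvCyclicUtil d fuel nb (vis.insert v true) (rs.insert v true) with
        | mk c rest =>
          cases rest with
          | mk vis2 rs2 =>
            rw [hrec] at hc hrs2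
            simp only at hc hrs2
            subst hc
            refine ⟨by trivial, fun x => ?_⟩
            simp only
            rw [PySem.Dict.getD_insert]
            by_cases hxv : x = v
            · simp [hxv, hv]
            · rw [if_neg hxv, hrs2 x, PySem.Dict.getD_insert, if_neg hxv]
      · rw [if_neg hvis]
        have hfalse : (rs.insert v true).getD nb false = true → False := by
          intro htrue
          by_cases hnbv : nb = v
          · rw [hnbv] at hnb
            exact pv_no_cycle d n hG 1 v (by omega) (pvIterN_one d hnb)
          · rw [PySem.Dict.getD_insert, if_neg hnbv] at htrue
            obtain ⟨m, hm⟩ := hR nb htrue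
            exact pv_no_cycle d n hG (m + 1) nb (by omega) (pvIterN_snoc d hm hnb)
        cases hrsnb : (rs.insert v true).getD nb false with
        | true => exact absurd hrsnb hfalse
        | false =>
          rw [if_neg (by simp)]
          refine ⟨by trivial, fun x => ?_⟩
          simp only
          rw [PySem.Dict.getD_insert, PySem.Dict.getD_insert]
          by_cases hxv : x = v
          · simp [hxv, hv]
          · simp [hxv]

theorem pvCycFold_false (d : PySem.Dict String String) (n : Nat)
    (hG : ∀ v, pvGood d n v) (f : Nat) :
    ∀ (ks : List String) (vis rs : PySem.Dict String Bool),
      (∀ x, rs.getD x false = false) →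
      (ks.foldl
        (fun (st : Bool × PySem.Dict String Bool × PySem.Dict String Bool) k =>
          if st.1 then st
          else if st.2.1.getD k false = false then pvCyclicUtil d f k st.2.1 st.2.2
          else st)
        (false, vis, rs)).1 = false := by
  intro ks
  induction ks with
  | nil => intro vis rs hrs; rfl
  | cons k ks ih =>
    intro vis rs hrs
    simp only [List.foldl_cons, if_neg (by simp : ¬((false, vis, rs).1 = true))]
    by_cases hk : (false, vis, rs).2.1.getD k false = false
    · rw [if_pos hk]
      obtain ⟨hc, hrs2⟩ := pvUtil_false d n hG f k vis rs (hrs k)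
        (fun x hx => absurd (hrs x) (by rw [hx]; simp))
        (fun x hx => absurd (hrs x) (by rw [hx]; simp))
      cases hrec : pvCyclicUtil d f k vis rs with
      | mk c rest =>
        cases rest with
        | mk vis2 rs2 =>
          rw [hrec] at hc hrs2
          simp only at hc hrs2
          subst hc
          exact ih vis2 rs2 (fun x => by rw [hrs2 x]; exact hrs x)
    · rw [if_neg hk]
      exact ih vis rs hrs

theorem pvMemoFold_inv (d : PySem.Dict String String) (n : Nat) (c : String) :
    ∀ (l : List String) (memo : PySem.Dict String String),
      (∀ k t, memo.get? k = some t → t = pvChase d n k) →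
      (∀ u ∈ l, pvChase d n u = c) →
      (∀ k t, (l.foldl (fun m u => m.insert u c) memo).get? k = some t → t = pvChase d n k) := by
  intro l
  induction l with
  | nil => intro memo hm _; exact hm
  | cons u l ih =>
    intro memo hm hl
    simp only [List.foldl_cons]
    refine ih (memo.insert u c) ?_ (fun x hx => hl x (List.mem_cons_of_mem u hx))
    intro k t hk
    rw [PySem.Dict.get?_insert] at hk
    by_cases hku : k = u
    · rw [if_pos hku] at hk
      cases hk
      rw [hku, hl u List.mem_cons_self]
    · rw [if_neg hku] at hk
      exact hm k t hk

theorem pvResolve_ok (d : PySem.Dict String String) (n : Nat)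
    (hG : ∀ v, pvGood d n v) :
    ∀ (fuel : Nat) (v : String) (path : List String) (onPath : PySem.Set String)
      (memo : PySem.Dict String String),
      (∃ j, j < fuel ∧ ((pvIterN d j v).map d.contains) = some false) →
      (∀ k t, memo.get? k = some t → t = pvChase d n k) →
      (∀ x, PySem.Set.contains onPath x = true ↔ x ∈ path) →
      (∀ u ∈ path, ∃ m, 1 ≤ m ∧ pvIterN d m u = some v) →
      ∃ memo', pvResolve d fuel v path onPath memo = some (pvChase d n v, memo') ∧
        (∀ k t, memo'.get? k = some t → t = pvChase d n k) := by
  intro fuel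
  induction fuel with
  | zero =>
    intro v path onPath memo hf _ _ _
    obtain ⟨j, hj, _⟩ := hf
    omega
  | succ fuel ih =>
    intro v path onPath memo hf hmemo honp hpath
    cases hb : (d.contains v && !(memo.contains v)) with
    | true =>
      simp only [pvResolve]
      rw [if_pos hb]
      have hcv : d.contains v = true := by
        cases h : d.contains v with
        | true => rfl
        | false => rw [h] at hb; simp at hb
      have hmv : memo.contains v = false := by
        cases h : memo.contains v with
        | false => rfl
        | true => rw [h] at hb; simp [hcv] at hb
      cases hop : PySem.Set.contains onPath v with
      | true =>
        obtain ⟨m, hm1, hm⟩ := hpath v ((honp v).mp hop)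
        exact absurd hm (fun hcontra => pv_no_cycle d n hG m v hm1 hcontra)
      | false =>
        rw [if_neg (by simp)]
        obtain ⟨u, hu⟩ : ∃ u, d.get? v = some u := by
          have := PySem.Dict.contains_eq_isSome_get? (d := d) (k := v)
          rw [hcv] at this
          cases h : d.get? v with
          | none => rw [h] at this; simp at this
          | some u => exact ⟨u, rfl⟩
        simp only [hu]
        obtain ⟨j, hj, hmap⟩ := hf
        have hj1 : j ≠ 0 := by
          intro h
          rw [h] at hmap
          simp only [pvIterN, Option.map_some] at hmap
          rw [hcv] at hmap
          simp at hmap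
        obtain ⟨j', rfl⟩ : ∃ j', j = j' + 1 := ⟨j - 1, by omega⟩
        have hf' : ∃ j, j < fuel ∧ ((pvIterN d j u).map d.contains) = some false := by
          refine ⟨j', by omega, ?_⟩
          simpa only [pvIterN, hu] using hmap
        have honp' : ∀ x, PySem.Set.contains (PySem.Set.add onPath v) x = true ↔ x ∈ path ++ [v] := by
          intro x
          rw [PySem.Set.contains_iff, PySem.Set.mem_add]
          constructor
          · rintro (hx | hx)
            · exact List.mem_append_left _ ((honp x).mp ((PySem.Set.contains_iff _ _).mpr hx))
            · exact List.mem_append_right _ (by simp [hx])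
          · intro hx
            rcases List.mem_append.mp hx with hx | hx
            · exact Or.inl ((PySem.Set.contains_iff _ _).mp ((honp x).mpr hx))
            · simp at hx; exact Or.inr hx
        have hpath' : ∀ u' ∈ path ++ [v], ∃ m, 1 ≤ m ∧ pvIterN d m u' = some u := by
          intro u' hu'
          rcases List.mem_append.mp hu' with hx | hx
          · obtain ⟨m, hm1, hm⟩ := hpath u' hx
            exact ⟨m + 1, by omega, pvIterN_snoc d hm hu⟩
          · simp at hx
            subst hx
            exact ⟨1, Nat.le_refl 1, pvIterN_one d hu⟩
        obtain ⟨memo', heq, hinv⟩ := ih u (path ++ [v]) (PySem.Set.add onPath v) memo hf' hmemo honp' hpath'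
        refine ⟨memo', ?_, hinv⟩
        rw [heq, pvT_step d n hG hu]
    | false =>
      simp only [pvResolve]
      rw [if_neg (by simp [hb])]
      have ht : memo.getD v v = pvChase d n v := by
        cases hmv : memo.contains v with
        | true =>
          obtain ⟨t0, ht0⟩ : ∃ t0, memo.get? v = some t0 := by
            have := PySem.Dict.contains_eq_isSome_get? (d := memo) (k := v)
            rw [hmv] at this
            cases h : memo.get? v with
            | none => rw [h] at this; simp at this
            | some t0 => exact ⟨t0, rfl⟩
          rw [PySem.Dict.getD_of_get?_eq_some memo v ht0]
          exact hmemo v t0 ht0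
        | false =>
          have hcv : d.contains v = false := by
            cases h : d.contains v with
            | false => rfl
            | true => rw [h, hmv] at hb; simp at hb
          rw [PySem.Dict.getD_of_not_contains memo v hmv, pvT_fix d n (pvContains_false_get? hcv)]
      refine ⟨path.foldl (fun m u => m.insert u (memo.getD v v)) memo, ?_, ?_⟩
      · rw [ht]
      · refine pvMemoFold_inv d n (memo.getD v v) path memo hmemo ?_
        intro u hu
        obtain ⟨m, _, hm⟩ := hpath u hu
        rw [pvT_reach d n hG m u v hm, ht]

theorem pvFold_eq (d : PySem.Dict String String) (n : Nat)
    (hG : ∀ v, pvGood d n v) :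
    ∀ (items : List (String × String)) (res memo : PySem.Dict String String),
      (∀ k t, memo.get? k = some t → t = pvChase d n k) →
      ∃ memo',
        (items.foldl
          (fun (acc : Option (PySem.Dict String String × PySem.Dict String String)) kv =>
            match acc with
            | none => none
            | some (res, memo) =>
              match pvResolve d (n + 1) kv.2 [] PySem.Set.empty memo with
              | none => none
              | some (t, memo') => some (res.insert kv.1 t, memo'))
          (some (res, memo)))
        = some (items.foldl (fun res kv => res.insert kv.1 (pvChase d n kv.2)) res, memo') ∧
        (∀ k t, memo'.get? k = some t → t = pvChase d n k) := by
  intro items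
  induction items with
  | nil => intro res memo hmemo; exact ⟨memo, rfl, hmemo⟩
  | cons kv items ih =>
    intro res memo hmemo
    have hf : ∃ j, j < n + 1 ∧ ((pvIterN d j kv.2).map d.contains) = some false := by
      obtain ⟨j, hj, hmap⟩ := hG kv.2
      exact ⟨j, by omega, hmap⟩
    obtain ⟨memo1, heq, hinv1⟩ := pvResolve_ok d n hG (n + 1) kv.2 [] PySem.Set.empty memo
      hf hmemo (fun x => by simp [PySem.Set.empty]) (by simp)
    simp only [List.foldl_cons, heq]
    exact ih (res.insert kv.1 (pvChase d n kv.2)) memo1 hinv1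

theorem pv_core (mapping : List (String × String)) (hPre : Pre_mflatten mapping) :
    mflatten mapping = mflatten_alt mapping := by
  have hG : ∀ v, pvGood (PySem.Dict.mk mapping) mapping.length v := by
    intro v
    cases hc : (PySem.Dict.mk mapping).contains v with
    | false => exact ⟨0, Nat.zero_le _, by simp [pvIterN, hc]⟩
    | true =>
      exact hPre v ((PySem.Dict.contains_iff_mem_keys _ _).mp hc)
  have hflag := pvCycFold_false (PySem.Dict.mk mapping) mapping.length hG
    (mapping.length + 1) (PySem.Dict.mk mapping).keys PySem.Dict.empty PySem.Dict.empty
    (fun x => by rw [PySem.Dict.getD_empty])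
  obtain ⟨memo', heq, _⟩ := pvFold_eq (PySem.Dict.mk mapping) mapping.length hG
    mapping PySem.Dict.empty PySem.Dict.empty (fun k t h => by rw [PySem.Dict.get?_empty] at h; cases h)
  simp only [mflatten, mflatten_alt]
  rw [if_neg (by rw [hflag]; exact Bool.false_ne_true), heq]

-- ===== VERDICT (by name: the statement is the Claim_ definition above) =====
theorem mflatten_spec : Claim_equal_mflatten := by
  intro mapping _hDom hPre
  exact pv_core mapping hPre
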